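-- pv_equiv track=rewrite | github.com/thekester/VertiLoc | scripts/super_benchmarks.py | _match_rooms
-- ===== SOURCE A (Python) =====
-- def _match_rooms(tokens: list[str], available_rooms: list[str]) -> list[str]:
--     lookup = {room.lower(): room for room in available_rooms}
--     resolved: list[str] = []
--     missing: list[str] = []
--     for token in tokens:
--         key = token.strip().lower()
--         if key in ("all", "a", "*"):
--             return available_rooms
--         if key in lookup:
--             resolved.append(lookup[key])
--         else:
--             missing.append(token)
--     if missing:
--         raise ValueError(f"Unknown rooms: {', '.join(missing)}")
--     return sorted(set(resolved), key=available_rooms.index)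
-- ===== SOURCE B (Python) =====
-- def _match_rooms(tokens: list[str], available_rooms: list[str]) -> list[str]:
--     lookup = {room.lower(): room for room in available_rooms}
--     keys = [token.strip().lower() for token in tokens]
--     if any(k in ("all", "a", "*") for k in keys):
--         return available_rooms
--     missing = [token for token, k in zip(tokens, keys) if k not in lookup]
--     if missing:
--         raise ValueError(f"Unknown rooms: {', '.join(missing)}")
--     resolved = {lookup[k] for k in keys}
--     out: list[str] = []
--     seen: set[str] = set()
--     for room in available_rooms:
--         if room in resolved and room not in seen:
--             out.append(room)
--             seen.add(room)
--     return out
-- ===== Notes on version B (the rewrite author's own statement) =====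
-- stated objective: alternative
-- what changed: B precomputes the normalized key list, short-circuits on any 'all'/'a'/'*' key, collects missing tokens by a zip filter, and replaces A's final sorted(set(resolved), key=available_rooms.index) by one linear scan over available_rooms with a seen-set, emitting resolved rooms in availability order without sorting.
import Mathlib
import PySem

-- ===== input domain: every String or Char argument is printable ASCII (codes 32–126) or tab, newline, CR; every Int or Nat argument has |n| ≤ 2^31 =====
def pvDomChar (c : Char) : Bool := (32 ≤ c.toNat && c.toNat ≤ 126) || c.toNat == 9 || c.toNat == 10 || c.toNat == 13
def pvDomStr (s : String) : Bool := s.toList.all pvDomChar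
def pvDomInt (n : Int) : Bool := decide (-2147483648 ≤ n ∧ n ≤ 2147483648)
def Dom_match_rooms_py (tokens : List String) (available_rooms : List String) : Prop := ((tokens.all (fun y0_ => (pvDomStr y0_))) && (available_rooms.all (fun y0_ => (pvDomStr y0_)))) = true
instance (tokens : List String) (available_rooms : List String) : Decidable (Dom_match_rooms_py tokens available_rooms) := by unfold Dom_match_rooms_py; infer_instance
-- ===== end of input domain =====

-- B replaces A's final sorted(set(resolved), key=available_rooms.index) by a single linear
-- scan over available_rooms with a 'seen' set: a different algorithm for the same order.

-- token.strip().lower(), as both Pythons compute it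
def pvKey (t : String) : String := PySem.Str.lower (PySem.Str.strip t)

-- {room.lower(): room for room in available_rooms}, as both Pythons build it
def pvLookup (avail : List String) : PySem.Dict String String :=
  avail.foldl (fun d room => d.insert (PySem.Str.lower room) room) PySem.Dict.empty

-- ===== PORT A =====
-- the for-loop of A; at the end, Python raises ValueError when missing ≠ [] (excluded by Pre_,
-- the port returns [] there).  available_rooms.index r is total here because every resolved
-- room is a value of lookup, hence an element of available_rooms: index? …|>.getD 0 is exact.
def matchLoopA (L : PySem.Dict String String) (avail : List String) :
    List String → List String → List String → List String
  | [], resolved, missing =>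
      if missing ≠ [] then []
      else PySem.List.sorted (PySem.Set.ofList resolved) (fun r => (PySem.List.index? avail r).getD 0)
  | token :: rest, resolved, missing =>
      let key := pvKey token
      if key == "all" || key == "a" || key == "*" then avail
      else if L.contains key then
        matchLoopA L avail rest (resolved ++ [(L.get? key).getD ""]) missing
      else matchLoopA L avail rest resolved (missing ++ [token])

def match_rooms_py (tokens : List String) (available_rooms : List String) : List String :=
  matchLoopA (pvLookup available_rooms) available_rooms tokens [] []

-- ===== PORT B =====
def match_rooms_py_alt (tokens : List String) (available_rooms : List String) : List String :=
  let lookup := pvLookup available_rooms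
  let keys := tokens.map pvKey
  if keys.any (fun k => k == "all" || k == "a" || k == "*") then available_rooms
  else
    let missing := ((tokens.zip keys).filter (fun p => !(lookup.contains p.2))).map (·.1)
    if missing ≠ [] then []   -- Python: raise ValueError (excluded by Pre_)
    else
      let resolved : PySem.Set String :=
        PySem.Set.ofList (keys.map (fun k => (lookup.get? k).getD ""))
      (available_rooms.foldl
        (fun (st : List String × PySem.Set String) room =>
          if PySem.Set.contains resolved room && !(PySem.Set.contains st.2 room) then
            (st.1 ++ [room], PySem.Set.add st.2 room)
          else st)
        ([], PySem.Set.empty)).1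

-- ===== PRECONDITION & SPEC =====
-- Pre_ excludes exactly the inputs where A raises ValueError: no token normalizes to
-- "all"/"a"/"*" and some token's key is not the lowercase of any available room.
def Pre_match_rooms_py (tokens : List String) (available_rooms : List String) : Prop :=
  (tokens.any (fun t => pvKey t == "all" || pvKey t == "a" || pvKey t == "*")) = true
  ∨ ∀ t ∈ tokens, pvKey t ∈ available_rooms.map PySem.Str.lower
instance (tokens : List String) (available_rooms : List String) : Decidable (Pre_match_rooms_py tokens available_rooms) := by unfold Pre_match_rooms_py; infer_instance

def pvWitness_match_rooms_py : List String × List String := (["Lab", " KITCHEN "], ["kitchen", "Lab", "Office"])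

def Spec_match_rooms_py (tokens : List String) (available_rooms : List String) (out : List String) : Prop := out = match_rooms_py_alt tokens available_rooms
instance (tokens : List String) (available_rooms : List String) (out : List String) : Decidable (Spec_match_rooms_py tokens available_rooms out) := by unfold Spec_match_rooms_py; infer_instance

-- ===== CLAIM (what is proved, stated in full; the proofs are below) =====
def Claim_equal_match_rooms_py : Prop := ∀ (tokens : List String) (available_rooms : List String), Dom_match_rooms_py tokens available_rooms → Pre_match_rooms_py tokens available_rooms → Spec_match_rooms_py tokens available_rooms (match_rooms_py tokens available_rooms)

-- ===== LEMMAS AND PROOFS =====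

-- keys of the lookup dict are the lowercased rooms (as a set)
theorem pvLookup_contains (avail : List String) (k : String) :
    (pvLookup avail).contains k = true ↔ k ∈ avail.map PySem.Str.lower := by
  unfold pvLookup
  rw [PySem.Dict.contains_eq_decide_mem_keys, PySem.Dict.keys_foldl_insert_key]
  simp [PySem.Set.update_nil_left, PySem.Set.mem_ofList]


-- every value of the lookup dict is an available room
theorem pvLookup_values (avail : List String) (k v : String) :
    (pvLookup avail).get? k = some v → v ∈ avail := by
  unfold pvLookup
  have H : ∀ (l : List String) (d : PySem.Dict String String),
      (∀ k v, d.get? k = some v → v ∈ avail) → (∀ x ∈ l, x ∈ avail) →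
      ∀ k v, (l.foldl (fun d room => d.insert (PySem.Str.lower room) room) d).get? k = some v → v ∈ avail := by
    intro l
    induction l with
    | nil => intro d hd _ k v h; exact hd k v h
    | cons a l ih =>
      intro d hd hl k v h
      refine ih _ ?_ (fun x hx => hl x (List.mem_cons_of_mem _ hx)) k v h
      intro k' v' h'
      rw [PySem.Dict.get?_insert] at h'
      split at h'
      · cases h'; exact hl a (List.mem_cons_self)
      · exact hd _ _ h'
  exact H avail PySem.Dict.empty (by intro k v h; simp [PySem.Dict.get?, PySem.Dict.empty] at h) (fun x hx => hx) k v


-- Set.ofList over an appended singleton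
theorem ofList_append_singleton (s : List String) (x : String) :
    PySem.Set.ofList (s ++ [x]) =
      if x ∈ s then PySem.Set.ofList s else PySem.Set.ofList s ++ [x] := by
  rw [PySem.Set.ofList_eq_foldl, List.foldl_append]
  rw [← PySem.Set.ofList_eq_foldl]
  simp only [List.foldl_cons, List.foldl_nil, PySem.Set.add]
  by_cases h : x ∈ s
  · simp [PySem.Set.contains, h, PySem.Set.mem_ofList]
  · simp [PySem.Set.contains, h, PySem.Set.mem_ofList]


-- the distinct elements of l.filter p, in first-occurrence order, are strictly
-- increasing under "first index in l" (Python's available_rooms.index key)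
theorem pairwise_rank (p : String → Bool) (l : List String) :
    (PySem.Set.ofList (l.filter p)).Pairwise
      (fun a b => (PySem.List.index? l a).getD 0 < (PySem.List.index? l b).getD 0) := by
  induction l using List.reverseRecOn with
  | nil => simp
  | append_singleton l x ih =>
    have hmem : ∀ a ∈ PySem.Set.ofList (l.filter p), a ∈ l := by
      intro a ha
      rw [PySem.Set.mem_ofList] at ha
      exact List.mem_of_mem_filter ha
    have hrank : ∀ a ∈ PySem.Set.ofList (l.filter p),
        (PySem.List.index? (l ++ [x]) a).getD 0 = (PySem.List.index? l a).getD 0 := by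
      intro a ha
      rw [PySem.List.index?_append_of_mem _ (hmem a ha)]
    have hlt : ∀ a ∈ PySem.Set.ofList (l.filter p), (PySem.List.index? l a).getD 0 < l.length := by
      intro a ha
      have := (PySem.List.index?_isSome_iff (xs := l) (v := a)).2 (hmem a ha)
      obtain ⟨k, hk⟩ := Option.isSome_iff_exists.1 this
      obtain ⟨hkl, -, -⟩ := PySem.List.getElem_of_index?_eq_some hk
      rw [hk]
      simpa using hkl
    by_cases hp : p x
    · have hf : List.filter p (l ++ [x]) = List.filter p l ++ [x] := by simp [hp]
      rw [hf]
      by_cases hx : x ∈ l.filter p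
      · rw [ofList_append_singleton, if_pos hx]
        refine ih.imp_of_mem ?_
        intro a b ha hb hab
        rwa [hrank a ha, hrank b hb]
      · have hxl : x ∉ l ∨ True := Or.inr trivial
        rw [ofList_append_singleton, if_neg hx]
        rw [List.pairwise_append]
        refine ⟨ih.imp_of_mem ?_, List.pairwise_singleton _ _, ?_⟩
        · intro a b ha hb hab
          rwa [hrank a ha, hrank b hb]
        · intro a ha b hb
          rw [List.mem_singleton] at hb
          rw [hb]
          have hxl' : x ∉ l := by
            intro hc
            exact hx (List.mem_filter.2 ⟨hc, hp⟩)
          rw [PySem.List.index?_append_singleton_self l x hxl']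
          rw [hrank a ha]
          simpa using hlt a ha
    · have hf : List.filter p (l ++ [x]) = List.filter p l := by simp [hp]
      rw [hf]
      refine ih.imp_of_mem ?_
      intro a b ha hb hab
      rwa [hrank a ha, hrank b hb]


-- B's seen-guarded scan computes Set.ofList of the filtered list
theorem scan_eq (R : PySem.Set String) (l : List String) : ∀ (o : List String),
    (l.foldl
      (fun (st : List String × PySem.Set String) room =>
        if PySem.Set.contains R room && !(PySem.Set.contains st.2 room) then
          (st.1 ++ [room], PySem.Set.add st.2 room)
        else st)
      (o, o)).1
    = l.foldl (fun acc room => if PySem.Set.contains R room then PySem.Set.add acc room else acc) o := by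
  induction l with
  | nil => intro o; rfl
  | cons room rest ih =>
    intro o
    simp only [List.foldl_cons]
    by_cases hR : PySem.Set.contains R room
    · by_cases ho : PySem.Set.contains o room
      · have hadd : PySem.Set.add o room = o := by
          simp only [PySem.Set.add, ho]
          simp
        simp only [hR, ho, Bool.not_true, Bool.and_false, Bool.false_eq_true, if_false, hadd]
        exact ih o
      · rw [Bool.not_eq_true] at ho
        have hadd : PySem.Set.add o room = o ++ [room] := by
          have hom : room ∉ o := by simpa using ho
          simp only [PySem.Set.add]
          rw [if_neg (by simpa using hom)]
        simp only [hR, ho, Bool.not_false, Bool.and_true, hadd]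
        exact ih (o ++ [room])
    · have h1 : (PySem.Set.contains R room && !(PySem.Set.contains o room)) = false := by
        have : room ∉ R := by simpa using hR
        simp [this]
      simp only [h1, Bool.false_eq_true, if_false, if_neg hR]
      exact ih o


-- characterization of A's loop
theorem matchLoopA_spec (L : PySem.Dict String String) (avail : List String) :
    ∀ (ts res mis : List String),
      matchLoopA L avail ts res mis =
        if ts.any (fun t => pvKey t == "all" || pvKey t == "a" || pvKey t == "*") then avail
        else if mis ++ ts.filter (fun t => !(L.contains (pvKey t))) ≠ [] then []
        else PySem.List.sorted
          (PySem.Set.ofList (res ++ ts.map (fun t => (L.get? (pvKey t)).getD "")))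
          (fun r => (PySem.List.index? avail r).getD 0) := by
  intro ts
  induction ts with
  | nil => intro res mis; simp [matchLoopA]
  | cons t ts ih =>
    intro res mis
    simp only [matchLoopA]
    by_cases hall : (pvKey t == "all" || pvKey t == "a" || pvKey t == "*") = true
    · rw [if_pos hall]
      simp [hall]
    · rw [Bool.not_eq_true] at hall
      rw [if_neg (by simp [hall])]
      by_cases hc : L.contains (pvKey t)
      · rw [if_pos hc, ih]
        simp [hall, hc, List.append_assoc]
      · rw [Bool.not_eq_true] at hc
        rw [if_neg (by simp [hc]), ih]
        simp [hall, hc, List.append_assoc]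


-- the heart: sorted-by-first-index of a nodup sublist of avail = the scan output
theorem sorted_eq_scan (R : List String) (avail : List String)
    (hnd : R.Nodup) (hsub : ∀ r ∈ R, r ∈ avail) :
    PySem.List.sorted R (fun r => (PySem.List.index? avail r).getD 0)
      = PySem.Set.ofList (avail.filter (fun room => PySem.Set.contains R room)) := by
  refine PySem.List.sorted_eq_of_perm_of_pairwise_lt _ _ _ ?_ ?_
  · rw [List.perm_ext_iff_of_nodup (PySem.Set.nodup_ofList _) hnd]
    intro a
    rw [PySem.Set.mem_ofList, List.mem_filter]
    constructor
    · rintro ⟨-, h⟩; simpa using h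
    · intro h; exact ⟨hsub a h, by simpa using h⟩
  · exact pairwise_rank _ avail


-- zip of a list with its own map
theorem zip_map_self (l : List String) (f : String → String) :
    l.zip (l.map f) = l.map (fun a => (a, f a)) := by
  induction l with
  | nil => rfl
  | cons a l ih => simp [ih]

-- ===== VERDICT (by name: the statement is the Claim_ definition above) =====
theorem match_rooms_py_spec : Claim_equal_match_rooms_py := by
  intro tokens avail _ hPre
  unfold Spec_match_rooms_py match_rooms_py match_rooms_py_alt
  rw [matchLoopA_spec]
  simp only [zip_map_self, List.filter_map, List.map_map, List.any_map, Function.comp_def, List.map_id']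
  by_cases hall : (tokens.any (fun t => pvKey t == "all" || pvKey t == "a" || pvKey t == "*")) = true
  · rw [if_pos hall, if_pos hall]
  · rw [if_neg hall, if_neg hall]
    have hPre' : ∀ t ∈ tokens, pvKey t ∈ avail.map PySem.Str.lower := by
      rcases hPre with h | h
      · exact absurd h hall
      · exact h
    have hcont : ∀ t ∈ tokens, (pvLookup avail).contains (pvKey t) = true := by
      intro t ht
      exact (pvLookup_contains avail (pvKey t)).2 (hPre' t ht)
    have hfil : tokens.filter (fun t => !((pvLookup avail).contains (pvKey t))) = [] := by
      rw [List.filter_eq_nil_iff]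
      intro t ht
      simp [hcont t ht]
    rw [List.nil_append, hfil]
    simp only [ne_eq, not_true_eq_false, List.nil_append]
    -- third branch: sorted vs scan
    set R := PySem.Set.ofList (tokens.map (fun t => ((pvLookup avail).get? (pvKey t)).getD "")) with hR
    have hsub : ∀ r ∈ R, r ∈ avail := by
      intro r hr
      rw [hR, PySem.Set.mem_ofList, List.mem_map] at hr
      obtain ⟨t, ht, rfl⟩ := hr
      have hc := hcont t ht
      rw [PySem.Dict.contains_eq_isSome_get?] at hc
      obtain ⟨v, hv⟩ := Option.isSome_iff_exists.1 hc
      rw [hv]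
      exact pvLookup_values avail (pvKey t) v hv
    rw [sorted_eq_scan R avail (hR ▸ PySem.Set.nodup_ofList _) hsub]
    rw [show (PySem.Set.empty : PySem.Set String) = [] from rfl]
    rw [scan_eq]
    rw [← List.foldl_filter, ← PySem.Set.ofList_eq_foldl]
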